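-- pv_equiv track=rewrite | github.com/PawelMr/Advent_of_Code_2024 | day_22/task1_2.py | get_list_new_number_t2
-- ===== SOURCE A (Python) =====
-- def op_1(sn):
--     nsn = sn * 64
--     nsn = nsn ^ sn
--     return nsn % 16777216
--
-- def op_2(sn):
--     nsn = int(sn / 32)
--     nsn = nsn ^ sn
--     return nsn % 16777216
--
-- def op_3(sn):
--     nsn = sn * 2048
--     nsn = nsn ^ sn
--     return nsn % 16777216
--
-- def get_new_number(sn):
--     return op_3(op_2(op_1(sn)))
--
-- def get_list_new_number_t2(sn, len_n):
--     list_nn = [sn]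
--     list_nn.extend([sn := get_new_number(sn) for i in range(len_n-1)])
--     list_nn = [i%10 for i in list_nn]
--     dl = get_delta(list_nn)
--     dict_r={}
--     for i in range(3,len(dl)):
--         if not dict_r.get((dl[i-3],dl[i-2],dl[i-1],dl[i])):
--             dict_r.update({(dl[i-3],dl[i-2],dl[i-1],dl[i]):list_nn[i+1]})
--     # dict_r = {(dl[i-3],dl[i-2],dl[i-1],dl[i]):list_nn[i+1] for i in range(3,len(dl)) }
--     return dict_r
--
-- def get_delta(listn):
--     ld = [listn[i] - listn[i-1] for i in range(1, len(listn))]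
--     return ld
-- ===== SOURCE B (Python) =====
-- def _next_secret(n):
--     n = ((n * 64) ^ n) % 16777216
--     n = ((n // 32) ^ n) % 16777216
--     n = ((n * 2048) ^ n) % 16777216
--     return n
--
-- def get_list_new_number_t2(sn, len_n):
--     dict_r = {}
--     n = sn
--     prev = sn % 10
--     w = []
--     for _ in range(len_n - 1):
--         n = _next_secret(n)
--         p = n % 10
--         w.append(p - prev)
--         if len(w) > 4:
--             w.pop(0)
--         if len(w) == 4 and not dict_r.get(tuple(w)):
--             dict_r[tuple(w)] = p
--         prev = p
--     return dict_r
-- ===== Notes on version B (the rewrite author's own statement) =====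
-- stated objective: alternative
-- what changed: A makes four separate passes (build the whole secret-number list, map %10 to prices, build the whole delta list, then loop over indices 3..len with repeated list indexing to fill the dict); B is a single streaming loop that advances the secret, tracks the previous price and a rolling 4-delta window, and inserts into the dict on the fly, never materialising any intermediate list.
import Mathlib
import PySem

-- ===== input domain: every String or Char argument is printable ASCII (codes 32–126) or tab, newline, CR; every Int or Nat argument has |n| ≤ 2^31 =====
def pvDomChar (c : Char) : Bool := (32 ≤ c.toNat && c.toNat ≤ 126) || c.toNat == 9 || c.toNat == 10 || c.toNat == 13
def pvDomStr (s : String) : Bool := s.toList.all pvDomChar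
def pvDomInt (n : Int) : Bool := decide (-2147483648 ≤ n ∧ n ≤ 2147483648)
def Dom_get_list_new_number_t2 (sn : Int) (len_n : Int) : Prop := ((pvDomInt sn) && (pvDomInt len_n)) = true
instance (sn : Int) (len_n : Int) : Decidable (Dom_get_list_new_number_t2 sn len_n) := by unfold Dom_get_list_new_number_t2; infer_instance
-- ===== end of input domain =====

-- B fuses A's four passes (secret list, %10 map, delta list, indexed dict loop) into one
-- streaming loop over a rolling 4-delta window; objective: alternative (same asymptotic cost).

-- ===== PORT A =====
def op_1 (sn : Int) : Int :=
  let nsn := sn * 64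
  let nsn := PySem.Int.bxor nsn sn
  PySem.Int.mod nsn 16777216

def op_2 (sn : Int) : Int :=
  -- int(sn / 32): PySem.Int.truncdiv is exact here (every call receives 0 ≤ sn < 2^24 < 2^53)
  let nsn := PySem.Int.truncdiv sn 32
  let nsn := PySem.Int.bxor nsn sn
  PySem.Int.mod nsn 16777216

def op_3 (sn : Int) : Int :=
  let nsn := sn * 2048
  let nsn := PySem.Int.bxor nsn sn
  PySem.Int.mod nsn 16777216

def get_new_number (sn : Int) : Int := op_3 (op_2 (op_1 sn))

def get_delta (listn : List Int) : List Int :=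
  (PySem.List.pyRange 1 (listn.length : Int) 1).map
    (fun i => PySem.List.pyGetD listn i 0 - PySem.List.pyGetD listn (i - 1) 0)

def get_list_new_number_t2 (sn : Int) (len_n : Int) : List (List Int × Int) :=
  -- list_nn = [sn]; list_nn.extend([sn := get_new_number(sn) for i in range(len_n-1)])
  let st := (PySem.List.pyRange 0 (len_n - 1) 1).foldl
      (fun (st : Int × List Int) _ =>
        let nn := get_new_number st.1
        (nn, st.2 ++ [nn])) (sn, [])
  let list_nn := sn :: st.2
  let list_nn := list_nn.map (fun i => PySem.Int.mod i 10)
  let dl := get_delta list_nn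
  -- 'if not dict_r.get(key)': true iff the key is absent or stored with value 0 (all stored prices are ≥ 0)
  let dict := (PySem.List.pyRange 3 (dl.length : Int) 1).foldl
      (fun (d : PySem.Dict (List Int) Int) i =>
        let key := [PySem.List.pyGetD dl (i - 3) 0, PySem.List.pyGetD dl (i - 2) 0,
                    PySem.List.pyGetD dl (i - 1) 0, PySem.List.pyGetD dl i 0]
        if d.getD key 0 == 0 then d.insert key (PySem.List.pyGetD list_nn (i + 1) 0) else d)
      PySem.Dict.empty
  dict.items

-- ===== PORT B =====
def nextSecret (n : Int) : Int :=
  let n1 := PySem.Int.mod (PySem.Int.bxor (n * 64) n) 16777216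
  let n2 := PySem.Int.mod (PySem.Int.bxor (PySem.Int.floordiv n1 32) n1) 16777216
  PySem.Int.mod (PySem.Int.bxor (n2 * 2048) n2) 16777216

def get_list_new_number_t2_alt (sn : Int) (len_n : Int) : List (List Int × Int) :=
  let st := (PySem.List.pyRange 0 (len_n - 1) 1).foldl
      (fun (st : Int × Int × List Int × PySem.Dict (List Int) Int) _ =>
        let n := nextSecret st.1
        let p := PySem.Int.mod n 10
        let w := st.2.2.1 ++ [p - st.2.1]
        let w := if 4 < w.length then w.tail else w   -- w.pop(0)
        let d := if w.length == 4 && st.2.2.2.getD w 0 == 0 then st.2.2.2.insert w p else st.2.2.2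
        (n, p, w, d))
      (sn, PySem.Int.mod sn 10, ([] : List Int), PySem.Dict.empty)
  st.2.2.2.items

-- ===== PRECONDITION & SPEC =====
def Spec_get_list_new_number_t2 (sn : Int) (len_n : Int) (out : List (List Int × Int)) : Prop := out = get_list_new_number_t2_alt sn len_n
instance (sn : Int) (len_n : Int) (out : List (List Int × Int)) : Decidable (Spec_get_list_new_number_t2 sn len_n out) := by unfold Spec_get_list_new_number_t2; infer_instance

-- ===== CLAIM (what is proved, stated in full; the proofs are below) =====
def Claim_equal_get_list_new_number_t2 : Prop := ∀ (sn : Int) (len_n : Int), Dom_get_list_new_number_t2 sn len_n → Spec_get_list_new_number_t2 sn len_n (get_list_new_number_t2 sn len_n)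

-- ===== LEMMAS AND PROOFS =====

-- A's one step equals B's one step: int(x/32) on a value of op_1 (nonnegative) is floor division
theorem step_eq (n : Int) : get_new_number n = nextSecret n := by
  have h1 : 0 ≤ PySem.Int.mod (PySem.Int.bxor (n * 64) n) 16777216 :=
    PySem.Int.mod_nonneg _ (by norm_num)
  simp only [get_new_number, nextSecret, op_1, op_2, op_3, PySem.Int.truncdiv, PySem.Int.floordiv]
  rw [Int.tdiv_eq_ediv_of_nonneg h1, Int.fdiv_eq_ediv_of_nonneg _ (by norm_num)]

-- the secret-number sequence, its prices and price deltas
def nums (sn : Int) : Nat → Int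
  | 0 => sn
  | k + 1 => get_new_number (nums sn k)

def price (sn : Int) (k : Nat) : Int := PySem.Int.mod (nums sn k) 10

def delta (sn : Int) (k : Nat) : Int := price sn (k + 1) - price sn k

-- the 4-delta key ending at delta k (defined for 3 ≤ k)
def win (sn : Int) (k : Nat) : List Int :=
  [delta sn (k - 3), delta sn (k - 2), delta sn (k - 1), delta sn k]

-- the dict after A's loop has processed indices i ∈ [3, j)
def dictUpTo (sn : Int) : Nat → PySem.Dict (List Int) Int
  | 0 => PySem.Dict.empty
  | j + 1 =>
      let d := dictUpTo sn j
      if 3 ≤ j then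
        (if d.getD (win sn j) 0 == 0 then d.insert (win sn j) (price sn (j + 1)) else d)
      else d

def deltas (sn : Int) (m : Nat) : List Int := (List.range m).map (delta sn)

-- B's rolling window after m iterations: the last min(m,4) deltas
def windowL (sn : Int) (m : Nat) : List Int := (deltas sn m).drop (m - 4)

-- A's generator fold produces the secret numbers nums 1 .. nums m, ending in state nums m
theorem gen_fold (sn : Int) (m : Nat) :
    (PySem.List.pyRange 0 (m : Int) 1).foldl
      (fun (st : Int × List Int) _ =>
        let nn := get_new_number st.1
        (nn, st.2 ++ [nn])) (sn, []) =
    (nums sn m, (List.range m).map (fun k => nums sn (k + 1))) := by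
  induction m with
  | zero => simp [nums]
  | succ m ih =>
      have : ((m + 1 : Nat) : Int) = (m : Int) + 1 := by push_cast; ring
      rw [this, PySem.List.pyRange_one_succ_right (by positivity), List.foldl_append, ih,
        List.range_succ]
      simp [nums]

-- mapping % 10 over the secret list gives the price list
theorem prices_eq (sn : Int) (m : Nat) :
    (sn :: (List.range m).map (fun k => nums sn (k + 1))).map (fun i => PySem.Int.mod i 10) =
    (List.range (m + 1)).map (price sn) := by
  rw [List.range_succ_eq_map]
  simp [List.map_map, price, nums, Function.comp]

-- get_delta of the price list is the delta list
theorem delta_eq (sn : Int) (m : Nat) :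
    get_delta ((List.range (m + 1)).map (price sn)) = deltas sn m := by
  unfold get_delta deltas
  rw [List.length_map, List.length_range]
  rw [PySem.List.pyRange_one]
  have h1 : (((m + 1 : Nat) : Int) - 1).toNat = m := by omega
  rw [h1, List.map_map]
  apply List.map_congr_left
  intro k hk
  have hk' : k < m := List.mem_range.mp hk
  have e1 : (1 : Int) + (k : Int) = ((k + 1 : Nat) : Int) := by push_cast; ring
  have e2 : ((k + 1 : Nat) : Int) - 1 = ((k : Nat) : Int) := by push_cast; ring
  simp only [Function.comp, e1, e2, PySem.List.pyGetD_natCast]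
  rw [PySem.List.getD_map_range _ _ _ _ (by omega), PySem.List.getD_map_range _ _ _ _ (by omega)]
  rfl

def insN (sn : Int) (d : PySem.Dict (List Int) Int) (k : Nat) : PySem.Dict (List Int) Int :=
  if d.getD (win sn k) 0 == 0 then d.insert (win sn k) (price sn (k + 1)) else d

-- A's loop body, with the indexing into dl / list_nn evaluated
theorem bodyA_eq (sn : Int) (m : Nat) (d : PySem.Dict (List Int) Int) (i : Int)
    (h3 : 3 ≤ i) (hm : i < (m : Int)) :
    (let key := [PySem.List.pyGetD (deltas sn m) (i - 3) 0, PySem.List.pyGetD (deltas sn m) (i - 2) 0,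
                 PySem.List.pyGetD (deltas sn m) (i - 1) 0, PySem.List.pyGetD (deltas sn m) i 0]
     if d.getD key 0 == 0 then
       d.insert key (PySem.List.pyGetD ((List.range (m + 1)).map (price sn)) (i + 1) 0) else d) =
    insN sn d i.toNat := by
  have e3 : i - 3 = ((i.toNat - 3 : Nat) : Int) := by omega
  have e2 : i - 2 = ((i.toNat - 2 : Nat) : Int) := by omega
  have e1 : i - 1 = ((i.toNat - 1 : Nat) : Int) := by omega
  have e0 : i = ((i.toNat : Nat) : Int) := by omega
  have ep : i + 1 = ((i.toNat + 1 : Nat) : Int) := by omega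
  simp only [insN, win]
  conv_lhs => rw [e3, e2, e1, ep, e0]
  simp only [PySem.List.pyGetD_natCast, deltas]
  rw [PySem.List.getD_map_range _ _ _ _ (by omega), PySem.List.getD_map_range _ _ _ _ (by omega),
    PySem.List.getD_map_range _ _ _ _ (by omega), PySem.List.getD_map_range _ _ _ _ (by omega),
    PySem.List.getD_map_range _ _ _ _ (by omega)]
  simp only [Int.toNat_natCast]

-- A's dict loop over range(3, m) builds dictUpTo m
theorem dictA_fold (sn : Int) (m : Nat) :
    (PySem.List.pyRange 3 (m : Int) 1).foldl (fun d i => insN sn d i.toNat) PySem.Dict.empty =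
    dictUpTo sn m := by
  induction m with
  | zero => simp [PySem.List.pyRange_one_eq_nil, dictUpTo]
  | succ m ih =>
      by_cases h3 : 3 ≤ m
      · have : ((m + 1 : Nat) : Int) = (m : Int) + 1 := by push_cast; ring
        rw [this, PySem.List.pyRange_one_succ_right (by exact_mod_cast h3), List.foldl_append, ih]
        simp [dictUpTo, h3, insN, Int.toNat_natCast]
      · have hnil1 : PySem.List.pyRange 3 ((m + 1 : Nat) : Int) 1 = [] :=
          PySem.List.pyRange_one_eq_nil (by omega)
        have hnil2 : PySem.List.pyRange 3 ((m : Nat) : Int) 1 = [] :=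
          PySem.List.pyRange_one_eq_nil (by omega)
        rw [hnil1]
        rw [hnil2] at ih
        simp at ih
        simp [dictUpTo, h3, ← ih]

theorem length_windowL (sn : Int) (m : Nat) : (windowL sn m).length = min m 4 := by
  simp [windowL, deltas]; omega

-- one append-then-trim step of B's rolling window
theorem windowL_step (sn : Int) (m : Nat) :
    (if 4 < (windowL sn m ++ [delta sn m]).length then (windowL sn m ++ [delta sn m]).tail
     else windowL sn m ++ [delta sn m]) = windowL sn (m + 1) := by
  have hld : (deltas sn m).length = m := by simp [deltas]
  have hds : deltas sn (m + 1) = deltas sn m ++ [delta sn m] := by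
    simp [deltas, List.range_succ]
  by_cases h : 4 ≤ m
  · rw [if_pos (by rw [List.length_append, length_windowL]; simp; omega)]
    unfold windowL
    rw [hds, List.drop_append_of_le_length (by omega)]
    have hne : (deltas sn m).drop (m - 4) ≠ [] := by
      intro hc
      have := congrArg List.length hc
      simp [hld] at this; omega
    rw [List.tail_append_of_ne_nil hne, List.tail_drop]
    have he : m - 4 + 1 = m + 1 - 4 := by omega
    rw [he]
  · rw [if_neg (by rw [List.length_append, length_windowL]; simp; omega)]
    unfold windowL
    rw [hds]
    have h1 : m - 4 = 0 := by omega
    have h2 : m + 1 - 4 = 0 := by omega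
    rw [h1, h2]
    simp

-- once 4 deltas have accumulated, the window IS A's key win sn m
theorem windowL_succ_win (sn : Int) (m : Nat) (h3 : 3 ≤ m) :
    windowL sn (m + 1) = win sn m := by
  unfold windowL deltas win
  have hm : m + 1 = (m - 3) + 4 := by omega
  rw [hm, List.range_add, List.map_append, List.drop_append_of_le_length (by simp)]
  have : m - 3 + 4 - 4 = m - 3 := by omega
  rw [this]
  have hdrop : ((List.range (m - 3)).map (delta sn)).drop (m - 3) = [] := by simp
  rw [hdrop]
  have : List.range 4 = [0, 1, 2, 3] := by decide
  rw [this]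
  simp only [List.map_cons, List.map_nil, List.nil_append]
  have a0 : m - 3 + 0 = m - 3 := by omega
  have a1 : m - 3 + 1 = m - 2 := by omega
  have a2 : m - 3 + 2 = m - 1 := by omega
  have a3 : m - 3 + 3 = m := by omega
  rw [a0, a1, a2, a3]

-- B's conditional insert advances dictUpTo by one step
theorem dict_step (sn : Int) (m : Nat) :
    (if ((windowL sn (m + 1)).length == 4 &&
          (dictUpTo sn m).getD (windowL sn (m + 1)) 0 == 0) = true then
       (dictUpTo sn m).insert (windowL sn (m + 1)) (price sn (m + 1))
     else dictUpTo sn m) = dictUpTo sn (m + 1) := by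
  by_cases h3 : 3 ≤ m
  · rw [windowL_succ_win sn m h3]
    have hlen : (win sn m).length = 4 := rfl
    simp only [hlen, dictUpTo, h3, if_true, beq_self_eq_true, Bool.true_and]
  · have hlen : (windowL sn (m + 1)).length = m + 1 := by rw [length_windowL]; omega
    have hne : ((windowL sn (m + 1)).length == 4) = false := by
      simp [hlen]; omega
    simp [hne, dictUpTo, h3]

-- B's single fold maintains (current secret, current price, rolling window, A's partial dict)
theorem altB_fold (sn : Int) (m : Nat) :
    (PySem.List.pyRange 0 (m : Int) 1).foldl
      (fun (st : Int × Int × List Int × PySem.Dict (List Int) Int) _ =>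
        let n := nextSecret st.1
        let p := PySem.Int.mod n 10
        let w := st.2.2.1 ++ [p - st.2.1]
        let w := if 4 < w.length then w.tail else w
        let d := if w.length == 4 && st.2.2.2.getD w 0 == 0 then st.2.2.2.insert w p else st.2.2.2
        (n, p, w, d))
      (sn, PySem.Int.mod sn 10, ([] : List Int), PySem.Dict.empty) =
    (nums sn m, price sn m, windowL sn m, dictUpTo sn m) := by
  induction m with
  | zero => simp [nums, price, windowL, deltas, dictUpTo]
  | succ m ih =>
      have hc : ((m + 1 : Nat) : Int) = (m : Int) + 1 := by push_cast; ring
      rw [hc, PySem.List.pyRange_one_succ_right (by positivity), List.foldl_append, ih]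
      simp only [List.foldl_cons, List.foldl_nil]
      have hn : nextSecret (nums sn m) = nums sn (m + 1) := (step_eq (nums sn m)).symm
      rw [hn]
      have hp : PySem.Int.mod (nums sn (m + 1)) 10 = price sn (m + 1) := rfl
      rw [hp]
      have hd : price sn (m + 1) - price sn m = delta sn m := rfl
      rw [hd]
      rw [windowL_step, dict_step]

theorem pyRange_zero_toNat (b : Int) :
    PySem.List.pyRange 0 b 1 = PySem.List.pyRange 0 ((b.toNat : Nat) : Int) 1 := by
  rw [PySem.List.pyRange_zero, PySem.List.pyRange_zero, Int.toNat_natCast]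

theorem main_eq (sn : Int) (len_n : Int) :
    get_list_new_number_t2 sn len_n = get_list_new_number_t2_alt sn len_n := by
  unfold get_list_new_number_t2 get_list_new_number_t2_alt
  rw [pyRange_zero_toNat (len_n - 1)]
  rw [gen_fold, altB_fold]
  simp only []
  rw [prices_eq, delta_eq]
  have hlen : (deltas sn ((len_n - 1).toNat)).length = (len_n - 1).toNat := by simp [deltas]
  rw [hlen]
  congr 1
  rw [← dictA_fold]
  apply PySem.List.foldl_congr_mem
  intro acc x hx
  have hmem := PySem.List.mem_pyRange_one.mp hx
  exact bodyA_eq sn _ acc x hmem.1 hmem.2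

-- ===== VERDICT (by name: the statement is the Claim_ definition above) =====
theorem get_list_new_number_t2_spec : Claim_equal_get_list_new_number_t2 := by
  intro sn len_n _
  exact main_eq sn len_n
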